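-- pv_equiv track=rewrite | github.com/Svare/ia | calcularPosicionBasura.py | left_distance
-- ===== SOURCE A (Python) =====
-- def left_distance(cadenas,pos_x,pos_y):
-- 	i = pos_y-1
-- 	if pos_y == 0:
-- 			return -1 # No puedo ir a la izquierda
-- 	while True:
-- 		if cadenas[pos_x][i] == 'B':
-- 			return -(pos_y-i) # Sumo este numero en X y encuentro basura
-- 		if i == 0:
-- 			return -2 # Puedo ir a la izquierda pero no hay basura
-- 		i = i -1
-- ===== SOURCE B (Python) =====
-- def left_distance(cadenas, pos_x, pos_y):
--     if pos_y == 0: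
--         return -1  # cannot go left
--     last = None
--     for i in range(pos_y):
--         if cadenas[pos_x][i] == 'B':
--             last = i
--     if last is None:
--         return -2  # can go left but no trash
--     return last - pos_y
-- ===== Notes on version B (the rewrite author's own statement) =====
-- stated objective: alternative
-- what changed: A scans backward from pos_y-1 with early exit at the first 'B'; B does one forward pass over range(pos_y) keeping the index of the last 'B' seen and decides the -1/-2/offset result afterwards.
-- outside the precondition, e.g. on left_distance(['BA'], 0, -1): A returns -1, B returns -2
import Mathlib
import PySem

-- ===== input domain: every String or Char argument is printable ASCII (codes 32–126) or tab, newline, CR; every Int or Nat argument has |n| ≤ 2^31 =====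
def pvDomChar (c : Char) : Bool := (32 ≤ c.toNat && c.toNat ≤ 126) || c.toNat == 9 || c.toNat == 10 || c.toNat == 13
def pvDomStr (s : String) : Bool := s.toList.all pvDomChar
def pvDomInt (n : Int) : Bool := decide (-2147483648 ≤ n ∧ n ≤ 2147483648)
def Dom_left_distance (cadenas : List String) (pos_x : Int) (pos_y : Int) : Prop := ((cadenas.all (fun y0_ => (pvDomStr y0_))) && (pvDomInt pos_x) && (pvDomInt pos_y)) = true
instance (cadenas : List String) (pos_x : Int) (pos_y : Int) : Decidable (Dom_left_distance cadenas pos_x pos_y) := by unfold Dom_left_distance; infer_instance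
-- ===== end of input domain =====

-- B replaces A's backward early-exit scan by a forward pass that keeps the last 'B' index (alternative decomposition, same cost); return values agree on the stated natural domain.


-- ===== PORT A =====
-- A's 'while True' loop over the row's characters, i counting down from pos_y-1.
-- Where the Python indexing raises IndexError (pyGet? = none) the port returns 0 (excluded by Pre_).
def ldLoopA (row : List Char) (pos_y : Int) (i : Int) : Int :=
  match h : PySem.List.pyGet? row i with
  | none => 0
  | some c =>
    if c = 'B' then -(pos_y - i)
    else if i = 0 then -2
    else ldLoopA row pos_y (i - 1)
termination_by (i + row.length + 1).toNat
decreasing_by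
  have hin : -(row.length : Int) ≤ i ∧ i < row.length := by
    have := (PySem.List.pyGet?_eq_none_iff (xs := row) (i := i))
    by_cases hr : PySem.Raise.InRange row.length i
    · simpa [PySem.Raise.InRange] using hr
    · simp [this.mpr hr] at h
  omega

def left_distance (cadenas : List String) (pos_x : Int) (pos_y : Int) : Int :=
  -- i = pos_y - 1; if pos_y == 0: return -1
  if pos_y = 0 then -1
  else
    match PySem.List.pyGet? cadenas pos_x with
    | none => 0  -- IndexError on cadenas[pos_x] (excluded by Pre_)
    | some s => ldLoopA s.toList pos_y (pos_y - 1)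

-- ===== PORT B =====
-- forward pass: last index i < pos_y with cadenas[pos_x][i] == 'B', then decide.
-- Where Python B raises (row lookup out of range) the port uses defaults (excluded by Pre_).
def left_distance_alt (cadenas : List String) (pos_x : Int) (pos_y : Int) : Int :=
  if pos_y = 0 then -1
  else
    let row := ((PySem.List.pyGet? cadenas pos_x).map String.toList).getD []
    let last := (PySem.List.pyRange 0 pos_y 1).foldl
      (fun acc i => if PySem.List.pyGetD row i ' ' = 'B' then some i else acc)
      (none : Option Int)
    match last with
    | none => -2
    | some l => l - pos_y

-- ===== PRECONDITION & SPEC =====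
-- the row cadenas[pos_x] (Python indexing, so negative pos_x counts from the end)
def pvRowLD (cadenas : List String) (pos_x : Int) : List Char :=
  ((PySem.List.pyGet? cadenas pos_x).map String.toList).getD []
-- Pre_ excludes negative pos_y (Python's negative-index wraparound there is outside the task's
-- natural domain of grid columns), pos_x out of range (A raises IndexError on cadenas[pos_x]),
-- and rows shorter than pos_y (A raises IndexError); pos_y = 0 is fully admitted.
def Pre_left_distance (cadenas : List String) (pos_x : Int) (pos_y : Int) : Prop :=
  pos_y = 0 ∨
    (PySem.Raise.InRange cadenas.length pos_x ∧ 1 ≤ pos_y ∧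
      pos_y ≤ ((pvRowLD cadenas pos_x).length : Int))
instance (cadenas : List String) (pos_x : Int) (pos_y : Int) : Decidable (Pre_left_distance cadenas pos_x pos_y) := by unfold Pre_left_distance; infer_instance

def pvWitness_left_distance : List String × Int × Int := (["ABA", "BAA"], 1, 3)

def Spec_left_distance (cadenas : List String) (pos_x : Int) (pos_y : Int) (out : Int) : Prop := out = left_distance_alt cadenas pos_x pos_y
instance (cadenas : List String) (pos_x : Int) (pos_y : Int) (out : Int) : Decidable (Spec_left_distance cadenas pos_x pos_y out) := by unfold Spec_left_distance; infer_instance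

-- ===== CLAIM (what is proved, stated in full; the proofs are below) =====
def Claim_equal_left_distance : Prop := ∀ (cadenas : List String) (pos_x : Int) (pos_y : Int), Dom_left_distance cadenas pos_x pos_y → Pre_left_distance cadenas pos_x pos_y → Spec_left_distance cadenas pos_x pos_y (left_distance cadenas pos_x pos_y)

-- ===== LEMMAS AND PROOFS =====

-- Reference function: greatest j < n with row[j] = 'B'.
def lastB (row : List Char) : Nat → Option Nat
  | 0 => none
  | n + 1 => if row.getD n ' ' = 'B' then some n else lastB row n

theorem ldLoopA_eq_lastB (row : List Char) (pos_y : Int) (n : Nat)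
    (hn : 1 ≤ n) (hlen : n ≤ row.length) :
    ldLoopA row pos_y ((n : Int) - 1) =
      match lastB row n with
      | none => -2
      | some j => -(pos_y - j) := by
  induction n with
  | zero => omega
  | succ m ih =>
    have harg : ((m + 1 : Nat) : Int) - 1 = (m : Int) := by push_cast; ring
    have hget : PySem.List.pyGet? row ((m : Int)) = some (row[m]'(by omega)) := by
      rw [PySem.List.pyGet?_natCast]
      simp [List.getElem?_eq_getElem (show m < row.length by omega)]
    have hgetD : row.getD m ' ' = row[m]'(by omega) := by
      simp [List.getD, List.getElem?_eq_getElem (by omega : m < row.length)]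
    rw [harg, ldLoopA]
    split
    · next heq => rw [hget] at heq; exact absurd heq (by simp)
    · next c heq =>
      rw [hget] at heq
      have hc : c = row[m]'(by omega) := by injection heq with h; exact h.symm
      subst hc
      by_cases hB : row[m]'(by omega) = 'B'
      · simp only [lastB, hgetD, hB, if_true]
      · by_cases hm0 : m = 0
        · subst hm0
          simp only [lastB, hgetD, hB, if_false, Nat.cast_zero]
          simp
        · have hne : ¬ ((m : Int) = 0) := by omega
          simp only [lastB, hgetD, hB, if_false, hne]
          exact ih (by omega) (by omega)

theorem foldl_eq_lastB (row : List Char) (n : Nat) (hlen : n ≤ row.length) :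
    (PySem.List.pyRange 0 (n : Int) 1).foldl
      (fun acc i => if PySem.List.pyGetD row i ' ' = 'B' then some i else acc)
      (none : Option Int) = (lastB row n).map (fun j => (j : Int)) := by
  induction n with
  | zero => simp [PySem.List.pyRange_one_eq_nil, lastB]
  | succ m ih =>
    have hsplit : PySem.List.pyRange 0 ((m : Int) + 1) 1
        = PySem.List.pyRange 0 (m : Int) 1 ++ [(m : Int)] := by
      exact PySem.List.pyRange_one_succ_right (by omega)
    have hgetD : PySem.List.pyGetD row ((m : Int)) ' ' = row.getD m ' ' := by
      simp [PySem.List.pyGetD_natCast]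
    push_cast
    rw [hsplit, List.foldl_append]
    simp only [List.foldl_cons, List.foldl_nil, ih (by omega), hgetD]
    by_cases hB : row[m]?.getD ' ' = 'B'
    · simp [lastB, List.getD, hB]
    · simp [lastB, List.getD, hB]

-- ===== VERDICT (by name: the statement is the Claim_ definition above) =====
theorem left_distance_spec : Claim_equal_left_distance := by
  intro cadenas pos_x pos_y _ hpre
  unfold Spec_left_distance left_distance left_distance_alt
  by_cases h0 : pos_y = 0
  · simp [h0]
  · rcases hpre with h | ⟨hx, hy1, hylen⟩
    · exact absurd h h0
    obtain ⟨str, hget⟩ : ∃ str, PySem.List.pyGet? cadenas pos_x = some str := by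
      cases hps : PySem.List.pyGet? cadenas pos_x with
      | none => exact absurd hx ((PySem.List.pyGet?_eq_none_iff cadenas pos_x).mp hps)
      | some str => exact ⟨str, rfl⟩
    have hrowd : pvRowLD cadenas pos_x = str.toList := by simp [pvRowLD, hget]
    rw [hrowd] at hylen
    set row := str.toList with hrow
    set n := pos_y.toNat with hn
    have hyn : pos_y = (n : Int) := by omega
    have hA : ldLoopA row pos_y (pos_y - 1) =
        match lastB row n with
        | none => -2
        | some j => -(pos_y - j) := by
      rw [hyn]; exact ldLoopA_eq_lastB row ((n : Int)) n (by omega) (by omega)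
    have hBfold := foldl_eq_lastB row n (by omega)
    simp only [h0, if_false, hget, Option.map_some, Option.getD_some]
    rw [hA, hyn]
    rw [show String.toList str = row from rfl]
    rw [hBfold]
    cases lastB row n with
    | none => rfl
    | some j => simp [neg_sub]
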